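-- pv_equiv track=rewrite | github.com/paramecio/parameciofm | paramecio/citoplasma/show_links.py | show_links
-- ===== SOURCE A (Python) =====
-- def show_links(switch, arr_links):
--
--     final_links=[]
--
--     for link in arr_links:
--
--         if link[0]==switch:
--
--             final_links.append(link[1])
--
--             break
--         else:
--
--             final_links.append('<a href="'+link[2]+'">'+link[1]+'</a>')
--
--     return final_links
-- ===== SOURCE B (Python) =====
-- def show_links(switch, arr_links):
--     links = list(arr_links)
--     for i, link in enumerate(links):
--         if link[0] == switch:
--             return ['<a href="' + l[2] + '">' + l[1] + '</a>' for l in links[:i]] + [link[1]]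
--     return ['<a href="' + l[2] + '">' + l[1] + '</a>' for l in links]
-- ===== Notes on version B (the rewrite author's own statement) =====
-- stated objective: alternative
-- what changed: B first locates the index of the first matching entry, then assembles the output in a separate step as a formatted-prefix comprehension plus the matched title, instead of A's single loop that formats-and-appends until it breaks.
import Mathlib
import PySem

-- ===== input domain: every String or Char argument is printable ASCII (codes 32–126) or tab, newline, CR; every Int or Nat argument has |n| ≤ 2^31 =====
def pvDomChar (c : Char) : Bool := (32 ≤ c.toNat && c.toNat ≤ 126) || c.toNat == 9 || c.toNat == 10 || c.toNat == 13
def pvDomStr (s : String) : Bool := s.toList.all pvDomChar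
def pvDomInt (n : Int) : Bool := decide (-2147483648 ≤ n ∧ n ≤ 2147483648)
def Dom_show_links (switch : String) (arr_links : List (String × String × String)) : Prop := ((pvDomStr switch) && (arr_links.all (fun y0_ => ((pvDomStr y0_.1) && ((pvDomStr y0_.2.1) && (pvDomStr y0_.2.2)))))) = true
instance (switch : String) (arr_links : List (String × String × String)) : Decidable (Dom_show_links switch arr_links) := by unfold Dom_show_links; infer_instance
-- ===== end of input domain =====

-- B finds the first matching index, then assembles prefix anchors ++ matched title in a separate step (alternative decomposition; same cost).


-- ===== PORT A =====
-- loop: for link in arr_links: if link[0]==switch: append link[1]; break else append anchor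
def showLinksLoop (switch : String) : List (String × String × String) → List String → List String
  | [], acc => acc
  | l :: rest, acc =>
    if l.1 == switch then acc ++ [l.2.1]
    else showLinksLoop switch rest (acc ++ ["<a href=\"" ++ l.2.2 ++ "\">" ++ l.2.1 ++ "</a>"])

def show_links (switch : String) (arr_links : List (String × String × String)) : List String :=
  showLinksLoop switch arr_links []

-- ===== PORT B =====
-- B: find the index of the first match, then build prefix map ++ [matched title]
def pvFmt (l : String × String × String) : String :=
  "<a href=\"" ++ l.2.2 ++ "\">" ++ l.2.1 ++ "</a>"

def show_links_alt (switch : String) (arr_links : List (String × String × String)) : List String :=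
  match arr_links.findIdx? (fun l => l.1 == switch) with
  | some i =>
    (arr_links.take i).map pvFmt ++
      (match arr_links.drop i with
       | l :: _ => [l.2.1]
       | [] => [])
  | none => arr_links.map pvFmt

-- ===== PRECONDITION & SPEC =====
def Spec_show_links (switch : String) (arr_links : List (String × String × String)) (out : List String) : Prop := out = show_links_alt switch arr_links
instance (switch : String) (arr_links : List (String × String × String)) (out : List String) : Decidable (Spec_show_links switch arr_links out) := by unfold Spec_show_links; infer_instance

-- ===== CLAIM (what is proved, stated in full; the proofs are below) =====
def Claim_equal_show_links : Prop := ∀ (switch : String) (arr_links : List (String × String × String)), Dom_show_links switch arr_links → Spec_show_links switch arr_links (show_links switch arr_links)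

-- ===== LEMMAS AND PROOFS =====

-- ===== VERDICT (by name: the statement is the Claim_ definition above) =====
theorem showLinksLoop_eq (switch : String) (xs : List (String × String × String))
    (acc : List String) :
    showLinksLoop switch xs acc = acc ++ show_links_alt switch xs := by
  induction xs generalizing acc with
  | nil => simp [showLinksLoop, show_links_alt]
  | cons l rest ih =>
    by_cases h : l.1 == switch
    · simp [showLinksLoop, show_links_alt, h, List.findIdx?_cons]
    · simp only [showLinksLoop, show_links_alt, List.findIdx?_cons, h, Bool.false_eq_true,
        ite_false, ih]
      cases hf : rest.findIdx? (fun l => l.1 == switch) with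
      | none => simp [pvFmt]
      | some i => simp [pvFmt]

theorem show_links_spec : Claim_equal_show_links := by
  intro switch arr_links _
  unfold Spec_show_links show_links
  simpa using showLinksLoop_eq switch arr_links []
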